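-- pv_equiv track=rewrite | github.com/pypi-data/pypi-mirror-293 | packages/ask-question/ask_question-1.2.8.tar.gz/ask_question-1.2.8/ask_question/ask_question_tui.py | is_version
-- ===== SOURCE A (Python) =====
-- def is_version(string: str) -> bool:
--     """ Check if the given string is a version """
--     string_length = len(string)-1
--     for i in enumerate(string):
--         if i[1].isdigit() is False:
--             if i[0] == string_length and (i[1] == '.' or i[1] == ','):
--                 return False
--             if i[1] != "." and i[1] != ",":
--                 return False
--     return True
-- ===== SOURCE B (Python) =====
-- def is_version(string: str) -> bool:
--     """ Check if the given string is a version """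
--     if not string:
--         return True
--     if string[-1] in '.,':
--         return False
--     core = ''.join(c for c in string if c not in '.,')
--     return core.isdigit()
-- ===== Notes on version B (the rewrite author's own statement) =====
-- stated objective: simpler
-- what changed: A's single indexed loop (enumerate with a positional special case for the last character) is replaced by a guard on the last character followed by filtering out the separators and one isdigit check on the remainder (transform-then-check instead of per-character index bookkeeping).
import Mathlib
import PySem

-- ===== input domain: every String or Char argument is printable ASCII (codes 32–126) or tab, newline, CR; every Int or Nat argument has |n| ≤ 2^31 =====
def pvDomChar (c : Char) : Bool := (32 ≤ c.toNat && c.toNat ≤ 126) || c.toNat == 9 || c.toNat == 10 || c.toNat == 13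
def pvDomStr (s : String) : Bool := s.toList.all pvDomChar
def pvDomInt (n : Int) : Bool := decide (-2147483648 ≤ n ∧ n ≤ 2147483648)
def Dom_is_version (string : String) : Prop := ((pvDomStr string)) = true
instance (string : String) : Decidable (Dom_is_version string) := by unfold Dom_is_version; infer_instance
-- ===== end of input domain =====

-- B replaces A's indexed per-character loop by a guard on the last character followed by
-- a filter-out-separators-then-isdigit check (simpler decomposition, same cost).


-- ===== PORT A =====
-- the 'for i in enumerate(string)' loop with its two early returns
def isVersionGo (string_length : Int) : List (Int × Char) → Bool
  | [] => true
  | (i, c) :: rest =>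
    if PySem.Chars.isdigit c = false then
      if i == string_length && (c == '.' || c == ',') then false
      else if c != '.' && c != ',' then false
      else isVersionGo string_length rest
    else isVersionGo string_length rest

def is_version (string : String) : Bool :=
  let string_length : Int := PySem.Str.len string - 1
  isVersionGo string_length (PySem.List.enumerate string.toList 0)

-- ===== PORT B =====
def is_version_alt (string : String) : Bool :=
  if string == "" then true
  else if (match PySem.Str.pyGet? string (-1) with
           | some c => c == '.' || c == ','
           | none => false) then false
  else
    -- core = ''.join(c for c in string if c not in '.,')
    let core : List Char := string.toList.filter (fun c => !(c == '.' || c == ','))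
    PySem.Chars.strIsdigit core

-- ===== PRECONDITION & SPEC =====
def Spec_is_version (string : String) (out : Bool) : Prop := out = is_version_alt string
instance (string : String) (out : Bool) : Decidable (Spec_is_version string out) := by unfold Spec_is_version; infer_instance

-- ===== CLAIM (what is proved, stated in full; the proofs are below) =====
def Claim_equal_is_version : Prop := ∀ (string : String), Dom_is_version string → Spec_is_version string (is_version string)

-- ===== LEMMAS AND PROOFS =====

-- a character A's loop lets pass without returning False (other than at the last index)
def goodChar (c : Char) : Bool := PySem.Chars.isdigit c || c == '.' || c == ','

def sepLast (l : List Char) : Bool :=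
  match l.getLast? with
  | some c => c == '.' || c == ','
  | none => false

-- the common characterisation of both programs
def specFn (l : List Char) : Bool := l.all goodChar && !(sepLast l)

lemma digit_not_sep (c : Char) (hd : PySem.Chars.isdigit c = true) :
    (c == '.') = false ∧ (c == ',') = false := by
  constructor <;>
  · rw [Bool.eq_false_iff]
    intro h
    have hc := beq_iff_eq.mp h
    subst hc
    exact absurd hd (by decide)

lemma sepLast_cons_cons (c d : Char) (rest : List Char) :
    sepLast (c :: d :: rest) = sepLast (d :: rest) := by
  simp [sepLast]

lemma enumerate_cons (c : Char) (l : List Char) (s : Int) :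
    PySem.List.enumerate (c :: l) s = (s, c) :: PySem.List.enumerate l (s + 1) := by
  simp [PySem.List.enumerate]

lemma enumerate_nil (s : Int) :
    PySem.List.enumerate ([] : List Char) s = [] := by
  simp [PySem.List.enumerate]

lemma goA (l : List Char) : ∀ (s n : Int), s + l.length = n + 1 →
    isVersionGo n (PySem.List.enumerate l s) = specFn l := by
  induction l with
  | nil => intro s n _; simp [isVersionGo, specFn, sepLast]
  | cons c rest ih =>
    intro s n h
    rw [enumerate_cons]
    cases rest with
    | nil =>
      have hs : s = n := by simpa using h
      subst hs
      rw [show isVersionGo s ((s, c) :: PySem.List.enumerate [] (s + 1)) =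
          isVersionGo s [(s, c)] by rw [enumerate_nil]]
      by_cases hd : PySem.Chars.isdigit c = true
      · obtain ⟨h1, h2⟩ := digit_not_sep c hd
        have h1' : ¬ c = '.' := by simpa using h1
        have h2' : ¬ c = ',' := by simpa using h2
        simp [isVersionGo, hd, specFn, sepLast, goodChar, h1', h2']
      · rw [Bool.not_eq_true] at hd
        by_cases h1 : c = '.'
        · subst h1; simp [isVersionGo, hd, specFn, sepLast, goodChar]
        · by_cases h2 : c = ','
          · subst h2; simp [isVersionGo, hd, specFn, sepLast, goodChar]
          · simp [isVersionGo, hd, specFn, sepLast, goodChar, h1, h2]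
    | cons d rest' =>
      have hsn : ¬ s = n := by
        intro he; subst he; simp [List.length] at h; omega
      have hrec := ih (s + 1) n (by simp at h ⊢; omega)
      rw [show isVersionGo n ((s, c) :: PySem.List.enumerate (d :: rest') (s + 1)) =
          (if PySem.Chars.isdigit c = false then
            if (s == n) && (c == '.' || c == ',') then false
            else if (c != '.') && (c != ',') then false
            else isVersionGo n (PySem.List.enumerate (d :: rest') (s + 1))
          else isVersionGo n (PySem.List.enumerate (d :: rest') (s + 1))) from rfl]
      rw [hrec]
      by_cases hd : PySem.Chars.isdigit c = true
      · have hg : goodChar c = true := by simp [goodChar, hd]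
        simp [hd, specFn, sepLast_cons_cons, hg]
      · rw [Bool.not_eq_true] at hd
        by_cases h1 : c = '.'
        · subst h1
          simp [hd, hsn, specFn, sepLast_cons_cons, goodChar]
        · by_cases h2 : c = ','
          · subst h2
            simp [hd, hsn, specFn, sepLast_cons_cons, goodChar]
          · simp [hd, hsn, h1, h2, specFn, sepLast_cons_cons, goodChar]

lemma A_eq_spec (string : String) : is_version string = specFn string.toList := by
  unfold is_version
  exact goA string.toList 0 (PySem.Str.len string - 1) (by simp [PySem.Str.len])

lemma B_eq_spec (string : String) : is_version_alt string = specFn string.toList := by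
  unfold is_version_alt
  by_cases hE : string = ""
  · subst hE; simp [specFn, sepLast]
  · have hne : string.toList ≠ [] := by
      intro hl
      exact hE (String.toList_inj.mp (by rw [hl]; rfl))
    rw [if_neg (by simpa using hE)]
    have hlast : PySem.Str.pyGet? string (-1) = some (string.toList.getLast hne) := by
      simp [PySem.List.pyGet?_neg_one, List.getLast?_eq_getLast_of_ne_nil hne]
    rw [hlast]
    have hsepLast : sepLast string.toList =
        ((string.toList.getLast hne == '.') || (string.toList.getLast hne == ',')) := by
      simp [sepLast, List.getLast?_eq_getLast_of_ne_nil hne]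
    by_cases hs : (string.toList.getLast hne == '.' || string.toList.getLast hne == ',') = true
    · simp [hs, specFn, hsepLast]
    · rw [if_neg (by simpa using hs)]
      simp only [specFn, hsepLast]
      simp only [Bool.or_eq_true, not_or, Bool.not_eq_true] at hs
      rw [hs.1, hs.2]
      simp only [Bool.or_self, Bool.not_false, Bool.and_true]
      -- strIsdigit (filter non-sep) = all goodChar, given the last char is not a separator
      by_cases hall : string.toList.all goodChar = true
      · rw [hall]
        have hdig : ∀ x ∈ string.toList.filter (fun c => !(c == '.' || c == ',')),
            PySem.Chars.isdigit x = true := by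
          intro x hx
          simp only [List.mem_filter, Bool.not_eq_true', Bool.or_eq_false_iff] at hx
          have hgx := List.all_eq_true.mp hall x hx.1
          simpa [goodChar, hx.2.1, hx.2.2] using hgx
        have hmem : string.toList.getLast hne ∈
            string.toList.filter (fun c => !(c == '.' || c == ',')) := by
          simp [List.mem_filter, hs.1, hs.2, List.getLast_mem]
        have h1 : (string.toList.filter (fun c => !(c == '.' || c == ','))).isEmpty = false :=
          List.isEmpty_eq_false_iff_exists_mem.mpr ⟨_, hmem⟩
        have h2 := List.all_eq_true.mpr hdig
        simp only [PySem.Chars.strIsdigit, h1, h2]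
        rfl
      · rw [Bool.not_eq_true] at hall
        rw [hall]
        obtain ⟨x, hx, hxg⟩ : ∃ x ∈ string.toList, ¬ goodChar x = true := by
          simpa [List.all_eq_true] using hall
        have hxd : PySem.Chars.isdigit x = false := by
          revert hxg; simp [goodChar]; tauto
        have hxs : (x == '.') = false ∧ (x == ',') = false := by
          revert hxg; simp [goodChar]; tauto
        have hmem : x ∈ string.toList.filter (fun c => !(c == '.' || c == ',')) := by
          simp [List.mem_filter, hx, hxs.1, hxs.2]
        simp only [PySem.Chars.strIsdigit, Bool.and_eq_false_iff]
        right
        exact List.all_eq_false.mpr ⟨x, hmem, by simp [hxd]⟩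

-- ===== VERDICT (by name: the statement is the Claim_ definition above) =====
theorem is_version_spec : Claim_equal_is_version := by
  intro string _
  unfold Spec_is_version
  rw [A_eq_spec, B_eq_spec]
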